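-- pv_equiv track=rewrite | github.com/speedhub-bot/Try1 | flux.py | detect_category_from_title
-- ===== SOURCE A (Python) =====
-- def detect_category_from_title(order_title, full_row_text=None):
--     """Detect category from order title with multi-language support"""
--     order_title_lower = order_title.lower()
--     text_to_check = full_row_text.lower() if full_row_text else order_title_lower
--
--     # Priority-based detection to prevent misclassification
--     # Check specific categories first (with multi-language support)
--     if any(keyword in text_to_check for keyword in ['overwatch', 'overwatch coins', 'owl tokens']):
--         return 'Overwatch'
--     elif any(keyword in text_to_check for keyword in ['sea of thieves', 'sea thieves', 'ancient coins', 'monedas', 'alijo secreto', 'tesoro oculto', 'lost chest', 'secret cache']):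
--         return 'Sea of Thieves'
--     elif any(keyword in text_to_check for keyword in ['roblox', 'robux']):
--         return 'Roblox'
--     elif any(keyword in text_to_check for keyword in ['league of legends', 'lol', 'riot points', 'puntos riot', 'ra-']):
--         return 'League of Legends'
--     elif any(keyword in text_to_check for keyword in ['game pass', 'xbox game pass', 'gamepass']):
--         return 'Game Pass'
--     elif any(keyword in text_to_check for keyword in ['minecraft', 'minecoins', 'monedas minecraft']):
--         return 'Minecraft'
--     elif any(keyword in text_to_check for keyword in ['gift card', 'giftcard', 'amazon', 'steam', 'playstation', 'xbox', 'nintendo', 'target', 'starbucks', 'subway', 'doordash', 'uber eats', 'uber', 'walmart', 'spotify', 'premium', 'tarjeta regalo']):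
--         return 'GIFTCARDS'
--
--     return 'Unknown'
-- ===== SOURCE B (Python) =====
-- # Flat keyword -> (priority, category) index; category = category of the matching
-- # keyword with the smallest priority, instead of an if/elif chain of any() checks.
-- KEYWORD_INDEX = [
--     ('overwatch', 0, 'Overwatch'), ('overwatch coins', 0, 'Overwatch'), ('owl tokens', 0, 'Overwatch'),
--     ('sea of thieves', 1, 'Sea of Thieves'), ('sea thieves', 1, 'Sea of Thieves'),
--     ('ancient coins', 1, 'Sea of Thieves'), ('monedas', 1, 'Sea of Thieves'),
--     ('alijo secreto', 1, 'Sea of Thieves'), ('tesoro oculto', 1, 'Sea of Thieves'),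
--     ('lost chest', 1, 'Sea of Thieves'), ('secret cache', 1, 'Sea of Thieves'),
--     ('roblox', 2, 'Roblox'), ('robux', 2, 'Roblox'),
--     ('league of legends', 3, 'League of Legends'), ('lol', 3, 'League of Legends'),
--     ('riot points', 3, 'League of Legends'), ('puntos riot', 3, 'League of Legends'),
--     ('ra-', 3, 'League of Legends'),
--     ('game pass', 4, 'Game Pass'), ('xbox game pass', 4, 'Game Pass'), ('gamepass', 4, 'Game Pass'),
--     ('minecraft', 5, 'Minecraft'), ('minecoins', 5, 'Minecraft'), ('monedas minecraft', 5, 'Minecraft'),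
--     ('gift card', 6, 'GIFTCARDS'), ('giftcard', 6, 'GIFTCARDS'), ('amazon', 6, 'GIFTCARDS'),
--     ('steam', 6, 'GIFTCARDS'), ('playstation', 6, 'GIFTCARDS'), ('xbox', 6, 'GIFTCARDS'),
--     ('nintendo', 6, 'GIFTCARDS'), ('target', 6, 'GIFTCARDS'), ('starbucks', 6, 'GIFTCARDS'),
--     ('subway', 6, 'GIFTCARDS'), ('doordash', 6, 'GIFTCARDS'), ('uber eats', 6, 'GIFTCARDS'),
--     ('uber', 6, 'GIFTCARDS'), ('walmart', 6, 'GIFTCARDS'), ('spotify', 6, 'GIFTCARDS'),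
--     ('premium', 6, 'GIFTCARDS'), ('tarjeta regalo', 6, 'GIFTCARDS'),
-- ]
--
-- def detect_category_from_title(order_title, full_row_text=None):
--     """Detect category by collecting every matching keyword and taking the one of highest priority."""
--     text = (full_row_text or order_title).lower()
--     best = min(((pri, cat) for kw, pri, cat in KEYWORD_INDEX if kw in text),
--                key=lambda pc: pc[0], default=None)
--     return best[1] if best is not None else 'Unknown'
-- ===== Notes on version B (the rewrite author's own statement) =====
-- stated objective: alternative
-- what changed: Instead of a priority if/elif chain that tests category keyword lists in order and returns on the first hit, B builds a flat keyword->(priority, category) index, collects every keyword that occurs in the text, and returns the category of the minimum-priority match (min with a None default), falling back to the default label when nothing matches.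
import Mathlib
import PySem

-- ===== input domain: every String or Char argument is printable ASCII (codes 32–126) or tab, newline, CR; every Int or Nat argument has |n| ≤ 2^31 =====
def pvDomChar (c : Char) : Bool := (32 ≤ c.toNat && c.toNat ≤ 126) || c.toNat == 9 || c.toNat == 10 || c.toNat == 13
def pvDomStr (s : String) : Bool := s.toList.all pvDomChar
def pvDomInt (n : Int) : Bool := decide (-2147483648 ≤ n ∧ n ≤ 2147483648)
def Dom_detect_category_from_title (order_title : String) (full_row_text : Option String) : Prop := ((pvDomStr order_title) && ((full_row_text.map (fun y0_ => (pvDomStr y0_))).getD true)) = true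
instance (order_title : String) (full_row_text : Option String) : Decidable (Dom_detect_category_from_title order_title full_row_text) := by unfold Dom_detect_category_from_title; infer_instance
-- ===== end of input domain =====

-- B replaces A's priority if/elif chain by a flat keyword→(priority, category) index:
-- it collects every matching keyword and returns the category of smallest priority (alternative decomposition; same cost).

-- ===== PORT A =====
def detect_category_from_title (order_title : String) (full_row_text : Option String) : String :=
  let order_title_lower := PySem.Str.lower order_title
  let text_to_check :=
    match full_row_text with
    | some s => if s == "" then order_title_lower else PySem.Str.lower s
    | none => order_title_lower
  if ["overwatch", "overwatch coins", "owl tokens"].any (fun keyword => PySem.Str.isIn keyword text_to_check) then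
    "Overwatch"
  else if ["sea of thieves", "sea thieves", "ancient coins", "monedas", "alijo secreto", "tesoro oculto", "lost chest", "secret cache"].any (fun keyword => PySem.Str.isIn keyword text_to_check) then
    "Sea of Thieves"
  else if ["roblox", "robux"].any (fun keyword => PySem.Str.isIn keyword text_to_check) then
    "Roblox"
  else if ["league of legends", "lol", "riot points", "puntos riot", "ra-"].any (fun keyword => PySem.Str.isIn keyword text_to_check) then
    "League of Legends"
  else if ["game pass", "xbox game pass", "gamepass"].any (fun keyword => PySem.Str.isIn keyword text_to_check) then
    "Game Pass"
  else if ["minecraft", "minecoins", "monedas minecraft"].any (fun keyword => PySem.Str.isIn keyword text_to_check) then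
    "Minecraft"
  else if ["gift card", "giftcard", "amazon", "steam", "playstation", "xbox", "nintendo", "target", "starbucks", "subway", "doordash", "uber eats", "uber", "walmart", "spotify", "premium", "tarjeta regalo"].any (fun keyword => PySem.Str.isIn keyword text_to_check) then
    "GIFTCARDS"
  else
    "Unknown"

-- ===== PORT B =====
def pvKeywordIndex : List (String × Int × String) :=
  [("overwatch", 0, "Overwatch"), ("overwatch coins", 0, "Overwatch"), ("owl tokens", 0, "Overwatch"),
   ("sea of thieves", 1, "Sea of Thieves"), ("sea thieves", 1, "Sea of Thieves"),
   ("ancient coins", 1, "Sea of Thieves"), ("monedas", 1, "Sea of Thieves"),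
   ("alijo secreto", 1, "Sea of Thieves"), ("tesoro oculto", 1, "Sea of Thieves"),
   ("lost chest", 1, "Sea of Thieves"), ("secret cache", 1, "Sea of Thieves"),
   ("roblox", 2, "Roblox"), ("robux", 2, "Roblox"),
   ("league of legends", 3, "League of Legends"), ("lol", 3, "League of Legends"),
   ("riot points", 3, "League of Legends"), ("puntos riot", 3, "League of Legends"),
   ("ra-", 3, "League of Legends"),
   ("game pass", 4, "Game Pass"), ("xbox game pass", 4, "Game Pass"), ("gamepass", 4, "Game Pass"),
   ("minecraft", 5, "Minecraft"), ("minecoins", 5, "Minecraft"), ("monedas minecraft", 5, "Minecraft"),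
   ("gift card", 6, "GIFTCARDS"), ("giftcard", 6, "GIFTCARDS"), ("amazon", 6, "GIFTCARDS"),
   ("steam", 6, "GIFTCARDS"), ("playstation", 6, "GIFTCARDS"), ("xbox", 6, "GIFTCARDS"),
   ("nintendo", 6, "GIFTCARDS"), ("target", 6, "GIFTCARDS"), ("starbucks", 6, "GIFTCARDS"),
   ("subway", 6, "GIFTCARDS"), ("doordash", 6, "GIFTCARDS"), ("uber eats", 6, "GIFTCARDS"),
   ("uber", 6, "GIFTCARDS"), ("walmart", 6, "GIFTCARDS"), ("spotify", 6, "GIFTCARDS"),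
   ("premium", 6, "GIFTCARDS"), ("tarjeta regalo", 6, "GIFTCARDS")]

def detect_category_from_title_alt (order_title : String) (full_row_text : Option String) : String :=
  -- text = (full_row_text or order_title).lower()
  let base :=
    match full_row_text with
    | some s => if s == "" then order_title else s
    | none => order_title
  let text := PySem.Str.lower base
  -- best = min of the matched (priority, category) pairs by priority (first extremal), default None
  let best := PySem.List.min?
      ((pvKeywordIndex.filter (fun t => PySem.Str.isIn t.1 text)).map Prod.snd)
      (fun pc => pc.1)
  match best with
  | some pc => pc.2
  | none => "Unknown"

-- ===== PRECONDITION & SPEC =====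
def Spec_detect_category_from_title (order_title : String) (full_row_text : Option String) (out : String) : Prop := out = detect_category_from_title_alt order_title full_row_text
instance (order_title : String) (full_row_text : Option String) (out : String) : Decidable (Spec_detect_category_from_title order_title full_row_text out) := by unfold Spec_detect_category_from_title; infer_instance

-- ===== CLAIM (what is proved, stated in full; the proofs are below) =====
def Claim_equal_detect_category_from_title : Prop := ∀ (order_title : String) (full_row_text : Option String), Dom_detect_category_from_title order_title full_row_text → Spec_detect_category_from_title order_title full_row_text (detect_category_from_title order_title full_row_text)

-- ===== LEMMAS AND PROOFS =====

-- peel one constant-priority block off the front of the keyword index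
lemma pv_step (f : String × Int × String → Bool) (blk rest : List (String × Int × String))
    (i : Int) (c : String)
    (hconst : ∀ t ∈ blk, t.2 = (i, c))
    (hrest : ∀ t ∈ rest, i < t.2.1) :
    (match PySem.List.min? (((blk ++ rest).filter f).map Prod.snd) (fun pc => pc.1) with
      | some pc => pc.2
      | none => "Unknown")
    = if blk.any f then c
      else
        (match PySem.List.min? ((rest.filter f).map Prod.snd) (fun pc => pc.1) with
          | some pc => pc.2
          | none => "Unknown") := by
  rw [List.filter_append, List.map_append]
  by_cases h : blk.any f = true
  · rw [if_pos h]
    obtain ⟨t, ht, hft⟩ := List.any_eq_true.mp h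
    have htf : t ∈ blk.filter f := List.mem_filter.mpr ⟨ht, hft⟩
    have hic : (i, c) ∈ (blk.filter f).map Prod.snd := by
      have hmm := List.mem_map_of_mem (f := Prod.snd) htf
      rwa [hconst t ht] at hmm
    have hicL : (i, c) ∈ (blk.filter f).map Prod.snd ++ (rest.filter f).map Prod.snd :=
      List.mem_append_left _ hic
    obtain ⟨m, hm⟩ : ∃ m, PySem.List.min?
        ((blk.filter f).map Prod.snd ++ (rest.filter f).map Prod.snd) (fun pc => pc.1) = some m := by
      cases hmin : PySem.List.min?
          ((blk.filter f).map Prod.snd ++ (rest.filter f).map Prod.snd) (fun pc => pc.1) with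
      | none => exact absurd ((PySem.List.min?_eq_none_iff _ _).mp hmin) (List.ne_nil_of_mem hicL)
      | some m => exact ⟨m, rfl⟩
    have hmem := PySem.List.min?_mem hm
    have hmin := PySem.List.min?_isMin hm (i, c) hicL
    have hmc : m = (i, c) := by
      rcases List.mem_append.mp hmem with h1 | h2
      · obtain ⟨t', ht', rfl⟩ := List.mem_map.mp h1
        exact hconst t' (List.mem_of_mem_filter ht')
      · obtain ⟨t', ht', rfl⟩ := List.mem_map.mp h2
        have hlt := hrest t' (List.mem_of_mem_filter ht')
        simp only at hmin
        omega
    rw [hm, hmc]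
  · rw [if_neg h]
    have hnil : blk.filter f = [] := by
      rw [List.filter_eq_nil_iff]
      intro t ht
      have := List.any_eq_false.mp (Bool.eq_false_iff.mpr h)
      simpa using this t ht
    rw [hnil]
    rfl

-- the seven blocks of pvKeywordIndex (proof-only helpers)
def pvB0 : List (String × Int × String) :=
  [("overwatch", 0, "Overwatch"), ("overwatch coins", 0, "Overwatch"), ("owl tokens", 0, "Overwatch")]
def pvB1 : List (String × Int × String) :=
  [("sea of thieves", 1, "Sea of Thieves"), ("sea thieves", 1, "Sea of Thieves"),
   ("ancient coins", 1, "Sea of Thieves"), ("monedas", 1, "Sea of Thieves"),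
   ("alijo secreto", 1, "Sea of Thieves"), ("tesoro oculto", 1, "Sea of Thieves"),
   ("lost chest", 1, "Sea of Thieves"), ("secret cache", 1, "Sea of Thieves")]
def pvB2 : List (String × Int × String) := [("roblox", 2, "Roblox"), ("robux", 2, "Roblox")]
def pvB3 : List (String × Int × String) :=
  [("league of legends", 3, "League of Legends"), ("lol", 3, "League of Legends"),
   ("riot points", 3, "League of Legends"), ("puntos riot", 3, "League of Legends"),
   ("ra-", 3, "League of Legends")]
def pvB4 : List (String × Int × String) :=
  [("game pass", 4, "Game Pass"), ("xbox game pass", 4, "Game Pass"), ("gamepass", 4, "Game Pass")]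
def pvB5 : List (String × Int × String) :=
  [("minecraft", 5, "Minecraft"), ("minecoins", 5, "Minecraft"), ("monedas minecraft", 5, "Minecraft")]
def pvB6 : List (String × Int × String) :=
  [("gift card", 6, "GIFTCARDS"), ("giftcard", 6, "GIFTCARDS"), ("amazon", 6, "GIFTCARDS"),
   ("steam", 6, "GIFTCARDS"), ("playstation", 6, "GIFTCARDS"), ("xbox", 6, "GIFTCARDS"),
   ("nintendo", 6, "GIFTCARDS"), ("target", 6, "GIFTCARDS"), ("starbucks", 6, "GIFTCARDS"),
   ("subway", 6, "GIFTCARDS"), ("doordash", 6, "GIFTCARDS"), ("uber eats", 6, "GIFTCARDS"),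
   ("uber", 6, "GIFTCARDS"), ("walmart", 6, "GIFTCARDS"), ("spotify", 6, "GIFTCARDS"),
   ("premium", 6, "GIFTCARDS"), ("tarjeta regalo", 6, "GIFTCARDS")]

lemma pv_split : pvKeywordIndex = pvB0 ++ (pvB1 ++ (pvB2 ++ (pvB3 ++ (pvB4 ++ (pvB5 ++ (pvB6 ++ ([] : List (String × Int × String)))))))) := rfl

-- the classification of a fixed lowered text: A's chain equals B's min-of-matches
lemma pv_classify (text : String) :
    (match PySem.List.min?
        ((pvKeywordIndex.filter (fun t => PySem.Str.isIn t.1 text)).map Prod.snd)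
        (fun pc => pc.1) with
      | some pc => pc.2
      | none => "Unknown")
    =
    (if ["overwatch", "overwatch coins", "owl tokens"].any (fun keyword => PySem.Str.isIn keyword text) then
      "Overwatch"
    else if ["sea of thieves", "sea thieves", "ancient coins", "monedas", "alijo secreto", "tesoro oculto", "lost chest", "secret cache"].any (fun keyword => PySem.Str.isIn keyword text) then
      "Sea of Thieves"
    else if ["roblox", "robux"].any (fun keyword => PySem.Str.isIn keyword text) then
      "Roblox"
    else if ["league of legends", "lol", "riot points", "puntos riot", "ra-"].any (fun keyword => PySem.Str.isIn keyword text) then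
      "League of Legends"
    else if ["game pass", "xbox game pass", "gamepass"].any (fun keyword => PySem.Str.isIn keyword text) then
      "Game Pass"
    else if ["minecraft", "minecoins", "monedas minecraft"].any (fun keyword => PySem.Str.isIn keyword text) then
      "Minecraft"
    else if ["gift card", "giftcard", "amazon", "steam", "playstation", "xbox", "nintendo", "target", "starbucks", "subway", "doordash", "uber eats", "uber", "walmart", "spotify", "premium", "tarjeta regalo"].any (fun keyword => PySem.Str.isIn keyword text) then
      "GIFTCARDS"
    else
      "Unknown") := by
  rw [pv_split,
    pv_step _ pvB0 _ 0 "Overwatch" (by decide) (by decide),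
    pv_step _ pvB1 _ 1 "Sea of Thieves" (by decide) (by decide),
    pv_step _ pvB2 _ 2 "Roblox" (by decide) (by decide),
    pv_step _ pvB3 _ 3 "League of Legends" (by decide) (by decide),
    pv_step _ pvB4 _ 4 "Game Pass" (by decide) (by decide),
    pv_step _ pvB5 _ 5 "Minecraft" (by decide) (by decide),
    pv_step _ pvB6 _ 6 "GIFTCARDS" (by decide) (by decide)]
  simp only [pvB0, pvB1, pvB2, pvB3, pvB4, pvB5, pvB6, List.any_cons, List.any_nil,
    Bool.or_false, List.filter_nil, List.map_nil]
  rfl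

-- ===== VERDICT (by name: the statement is the Claim_ definition above) =====
theorem detect_category_from_title_spec : Claim_equal_detect_category_from_title := by
  intro order_title full_row_text _
  unfold Spec_detect_category_from_title detect_category_from_title detect_category_from_title_alt
  cases full_row_text with
  | none => exact (pv_classify (PySem.Str.lower order_title)).symm
  | some s =>
    by_cases hs : s == ""
    · simp only [hs, if_true]
      exact (pv_classify (PySem.Str.lower order_title)).symm
    · simp only [hs]
      exact (pv_classify (PySem.Str.lower s)).symm
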